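-- pv_equiv track=rewrite | github.com/ksubra01/realtime-sidewalk-segmentation | segementation.py | predict_future_trajectory
-- ===== SOURCE A (Python) =====
-- def predict_future_trajectory(past_centroids, num_future_points=10):
--     if len(past_centroids) < 2:
--         return []
--
--     # Calculate velocity (dx, dy) based on the last two points
--     dx = past_centroids[-1][0] - past_centroids[-2][0]
--     dy = past_centroids[-1][1] - past_centroids[-2][1]
--
--     # Predict future points
--     future_points = []
--     last_point = past_centroids[-1]
--     for i in range(num_future_points):
--         next_point = (last_point[0] + dx, last_point[1] + dy)
--         future_points.append(next_point)
--         last_point = next_point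
--
--     return future_points
-- ===== SOURCE B (Python) =====
-- def predict_future_trajectory(past_centroids, num_future_points=10):
--     if len(past_centroids) < 2:
--         return []
--     dx = past_centroids[-1][0] - past_centroids[-2][0]
--     dy = past_centroids[-1][1] - past_centroids[-2][1]
--     lx, ly = past_centroids[-1]
--     return [(lx + (i + 1) * dx, ly + (i + 1) * dy) for i in range(num_future_points)]
-- ===== Notes on version B (the rewrite author's own statement) =====
-- stated objective: simpler
-- what changed: Replaces the stateful accumulating loop (each point built from the previous one) with a closed-form per-index comprehension last + (i+1)*velocity.
import Mathlib
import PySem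

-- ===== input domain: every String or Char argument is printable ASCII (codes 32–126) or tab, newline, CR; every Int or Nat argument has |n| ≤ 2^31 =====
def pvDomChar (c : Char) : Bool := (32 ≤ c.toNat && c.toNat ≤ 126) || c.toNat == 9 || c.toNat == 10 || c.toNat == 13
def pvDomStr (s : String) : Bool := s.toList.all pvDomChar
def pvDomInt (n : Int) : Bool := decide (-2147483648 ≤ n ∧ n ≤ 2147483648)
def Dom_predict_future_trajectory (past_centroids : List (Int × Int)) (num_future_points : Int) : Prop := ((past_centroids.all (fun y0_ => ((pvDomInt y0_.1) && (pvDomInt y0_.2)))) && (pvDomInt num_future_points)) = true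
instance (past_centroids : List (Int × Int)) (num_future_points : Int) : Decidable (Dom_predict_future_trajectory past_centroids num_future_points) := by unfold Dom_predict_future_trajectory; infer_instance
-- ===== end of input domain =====

-- B replaces A's stateful accumulating loop with a closed-form per-index comprehension (simpler decomposition; same cost).

-- ===== PORT A =====
def predict_future_trajectory (past_centroids : List (Int × Int)) (num_future_points : Int) : List (Int × Int) :=
  if past_centroids.length < 2 then [] else
  match PySem.List.pyGet? past_centroids (-1), PySem.List.pyGet? past_centroids (-2) with
  | some p1, some p2 =>
      let dx := p1.1 - p2.1
      let dy := p1.2 - p2.2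
      let st := (PySem.List.pyRange 0 num_future_points 1).foldl
        (fun (st : List (Int × Int) × (Int × Int)) _ =>
          let np := (st.2.1 + dx, st.2.2 + dy)
          (st.1 ++ [np], np)) ([], p1)
      st.1
  | _, _ => []  -- unreachable: length ≥ 2 makes both lookups succeed

-- ===== PORT B =====
def predict_future_trajectory_alt (past_centroids : List (Int × Int)) (num_future_points : Int) : List (Int × Int) :=
  if past_centroids.length < 2 then [] else
  match PySem.List.pyGet? past_centroids (-1) with
  | none => []
  | some p1 =>
    match PySem.List.pyGet? past_centroids (-2) with
    | none => []
    | some p2 =>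
      let dx := p1.1 - p2.1
      let dy := p1.2 - p2.2
      (PySem.List.pyRange 0 num_future_points 1).map
        (fun i => (p1.1 + (i + 1) * dx, p1.2 + (i + 1) * dy))

-- ===== PRECONDITION & SPEC =====
def Spec_predict_future_trajectory (past_centroids : List (Int × Int)) (num_future_points : Int) (out : List (Int × Int)) : Prop := out = predict_future_trajectory_alt past_centroids num_future_points
instance (past_centroids : List (Int × Int)) (num_future_points : Int) (out : List (Int × Int)) : Decidable (Spec_predict_future_trajectory past_centroids num_future_points out) := by unfold Spec_predict_future_trajectory; infer_instance

-- ===== CLAIM (what is proved, stated in full; the proofs are below) =====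
def Claim_equal_predict_future_trajectory : Prop := ∀ (past_centroids : List (Int × Int)) (num_future_points : Int), Dom_predict_future_trajectory past_centroids num_future_points → Spec_predict_future_trajectory past_centroids num_future_points (predict_future_trajectory past_centroids num_future_points)

-- ===== LEMMAS AND PROOFS =====

-- loop invariant: the accumulating fold over any list of length m produces the closed-form points
theorem pft_fold_closed (dx dy : Int) :
    ∀ (l : List Int) (acc : List (Int × Int)) (last : Int × Int),
      (l.foldl (fun (st : List (Int × Int) × (Int × Int)) _ =>
          let np := (st.2.1 + dx, st.2.2 + dy)
          (st.1 ++ [np], np)) (acc, last)).1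
      = acc ++ (List.range l.length).map
          (fun (k : Nat) => (last.1 + ((k : Int) + 1) * dx, last.2 + ((k : Int) + 1) * dy)) := by
  intro l
  induction l with
  | nil => simp
  | cons x xs ih =>
      intro acc last
      simp only [List.foldl_cons, List.length_cons, List.range_succ_eq_map, List.map_cons,
        List.map_map]
      rw [ih]
      simp only [List.append_assoc, List.cons_append, List.nil_append]
      congr 1
      simp only [List.cons.injEq]
      refine ⟨by simp, ?_⟩
      apply List.map_congr_left
      intro k _
      simp only [Function.comp_apply, Prod.mk.injEq]
      constructor <;> (push_cast; ring)

theorem predict_future_trajectory_eq (past_centroids : List (Int × Int)) (num_future_points : Int) :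
    predict_future_trajectory past_centroids num_future_points
      = predict_future_trajectory_alt past_centroids num_future_points := by
  unfold predict_future_trajectory predict_future_trajectory_alt
  split
  · rfl
  · cases h1 : PySem.List.pyGet? past_centroids (-1) with
    | none => rfl
    | some p1 =>
      cases h2 : PySem.List.pyGet? past_centroids (-2) with
      | none => rfl
      | some p2 =>
        simp only []
        rw [pft_fold_closed, PySem.List.pyRange_one]
        simp only [List.nil_append, List.length_map, List.length_range, List.map_map]
        apply List.map_congr_left
        intro k _
        simp only [Function.comp_apply, Prod.mk.injEq]
        constructor <;> ring

-- ===== VERDICT (by name: the statement is the Claim_ definition above) =====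
theorem predict_future_trajectory_spec : Claim_equal_predict_future_trajectory := by
  intro pcs n _
  exact predict_future_trajectory_eq pcs n
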